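-- pv_equiv track=rewrite | github.com/JesseWong333/pytorch_deeplearning | core/post_process/lang_model/end_symbol_bs_opt.py | get_end_symbol
-- ===== SOURCE A (Python) =====
-- symbol_list = "',.;:\\|/?\"`^&*()<>{}[]!@#$%*-_+=，。；：“”‘’｛｝【】、《》？！￥……（）—~·〔 〕 ˉ¯▲"
--
-- def get_end_symbol(string, type='tail'):
--     ret = ''
--     if type == 'tail':
--         search_string = string[::-1]
--     else:
--         search_string = string
--
--     for c in search_string:
--         if c not in symbol_list:
--             break
--         else:
--             # if c!=' ':
--             ret += c
--     return ret if type != 'tail' else ret[::-1]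
-- ===== SOURCE B (Python) =====
-- symbol_list = "',.;:\\|/?\"`^&*()<>{}[]!@#$%*-_+=，。；：“”‘’｛｝【】、《》？！￥……（）—~·〔 〕 ˉ¯▲"
--
-- def get_end_symbol(string, type='tail'):
--     # idiomatic: let str.rstrip/lstrip find the kept part, return the stripped-off run
--     if type == 'tail':
--         kept = string.rstrip(symbol_list)
--         return string[len(kept):]
--     kept = string.lstrip(symbol_list)
--     return string[:len(string) - len(kept)]
-- ===== Notes on version B (the rewrite author's own statement) =====
-- stated objective: idiomatic
-- what changed: Replaces the manual reverse/scan-and-accumulate loop with str.rstrip/lstrip(symbol_list) to find the kept part and a single slice to return the stripped-off symbol run; no char-by-char accumulation or double reversal.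
import Mathlib
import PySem

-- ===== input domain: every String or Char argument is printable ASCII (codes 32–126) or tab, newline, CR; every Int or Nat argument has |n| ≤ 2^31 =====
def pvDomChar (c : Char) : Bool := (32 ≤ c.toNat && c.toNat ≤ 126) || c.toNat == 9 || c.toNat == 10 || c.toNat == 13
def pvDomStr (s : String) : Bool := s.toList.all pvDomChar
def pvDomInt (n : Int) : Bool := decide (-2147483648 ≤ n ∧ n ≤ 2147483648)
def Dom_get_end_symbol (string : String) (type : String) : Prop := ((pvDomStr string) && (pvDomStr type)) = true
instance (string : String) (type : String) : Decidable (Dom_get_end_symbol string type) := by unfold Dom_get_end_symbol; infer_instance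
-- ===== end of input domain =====

-- B extracts the leading/trailing symbol run via lstrip/rstrip + one slice instead of A's
-- reverse/scan/accumulate loop (objective: idiomatic).

def pvSymbolList : List Char :=
  "',.;:\\|/?\"`^&*()<>{}[]!@#$%*-_+=，。；：“”‘’｛｝【】、《》？！￥……（）—~·〔 〕 ˉ¯▲".toList

-- ===== PORT A =====
-- the for-loop: accumulate chars while they are in symbol_list, break at the first that is not
def pvALoop : List Char → List Char
  | [] => []
  | c :: rest => if pvSymbolList.contains c then c :: pvALoop rest else []

def get_end_symbol (string : String) (type : String) : String :=
  let search_string := if type == "tail" then string.toList.reverse else string.toList  -- string[::-1]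
  let ret := pvALoop search_string
  if type != "tail" then String.ofList ret else String.ofList ret.reverse

-- ===== PORT B =====
-- str.rstrip(chars) / str.lstrip(chars) ported by hand (exact): drop chars of the set from
-- the right resp. left end; the returned slice has nonnegative in-range bounds, so
-- string[len(kept):] = drop, string[:len-len(kept)] = take.
def get_end_symbol_alt (string : String) (type : String) : String :=
  let cs := string.toList
  if type == "tail" then
    let kept := (cs.reverse.dropWhile (fun c => pvSymbolList.contains c)).reverse  -- string.rstrip(symbol_list)
    String.ofList (cs.drop kept.length)                                               -- string[len(kept):]
  else
    let kept := cs.dropWhile (fun c => pvSymbolList.contains c)                   -- string.lstrip(symbol_list)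
    String.ofList (cs.take (cs.length - kept.length))                                 -- string[:len(string)-len(kept)]

-- ===== PRECONDITION & SPEC =====
def Spec_get_end_symbol (string : String) (type : String) (out : String) : Prop := out = get_end_symbol_alt string type
instance (string : String) (type : String) (out : String) : Decidable (Spec_get_end_symbol string type out) := by unfold Spec_get_end_symbol; infer_instance

-- ===== CLAIM (what is proved, stated in full; the proofs are below) =====
def Claim_equal_get_end_symbol : Prop := ∀ (string : String) (type : String), Dom_get_end_symbol string type → Spec_get_end_symbol string type (get_end_symbol string type)

-- ===== LEMMAS AND PROOFS =====

theorem pv_take_sub_dropWhile (cs : List Char) (f : Char → Bool) :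
    cs.take (cs.length - (cs.dropWhile f).length) = cs.takeWhile f := by
  have h1 : cs.length = (cs.takeWhile f).length + (cs.dropWhile f).length := by
    rw [← List.length_append, List.takeWhile_append_dropWhile]
  rw [h1, Nat.add_sub_cancel]
  exact (List.prefix_iff_eq_take.mp (List.takeWhile_prefix f)).symm

theorem pv_drop_rev_dropWhile (cs : List Char) (f : Char → Bool) :
    (cs.reverse.takeWhile f).reverse = cs.drop (cs.reverse.dropWhile f).length := by
  have h : cs = (cs.reverse.dropWhile f).reverse ++ (cs.reverse.takeWhile f).reverse :=
    calc cs = cs.reverse.reverse := (List.reverse_reverse cs).symm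
    _ = ((cs.reverse.takeWhile f) ++ (cs.reverse.dropWhile f)).reverse := by
          rw [List.takeWhile_append_dropWhile]
    _ = _ := by rw [List.reverse_append]
  have hd : List.drop ((cs.reverse.dropWhile f).reverse).length
      ((cs.reverse.dropWhile f).reverse ++ (cs.reverse.takeWhile f).reverse)
      = (cs.reverse.takeWhile f).reverse := List.drop_left
  rw [List.length_reverse] at hd
  rw [← h] at hd
  exact hd.symm

theorem pvALoop_eq_takeWhile (cs : List Char) :
    pvALoop cs = cs.takeWhile (fun c => pvSymbolList.contains c) := by
  induction cs with
  | nil => rfl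
  | cons c rest ih =>
    simp only [pvALoop, List.takeWhile_cons]
    split <;> simp_all

-- ===== VERDICT (by name: the statement is the Claim_ definition above) =====
theorem get_end_symbol_spec : Claim_equal_get_end_symbol := by
  intro string type _
  unfold Spec_get_end_symbol get_end_symbol get_end_symbol_alt
  by_cases h : type = "tail"
  · simp [h, pvALoop_eq_takeWhile]
    rw [pv_drop_rev_dropWhile]
  · simp [h, pvALoop_eq_takeWhile]
    rw [show string.length = string.toList.length from String.length_toList.symm,
      pv_take_sub_dropWhile]
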